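-- pv_equiv track=rewrite | github.com/FlaBBB/Cybers_security | tools/globfuscator.py | question_conv
-- ===== SOURCE A (Python) =====
-- def question_conv(in_string: str, seed: int) -> str:
--     if seed < 1:
--         return in_string
--
--     tot_raw = 0
--     for t in in_string:
--         if t not in ["*", "?"]:
--             tot_raw += 1
--
--     i_o = bin(seed)[2:].zfill(tot_raw)
--
--     res = ''
--     for z in in_string:
--         if z in ["*", "?"]:
--             res += z
--         else:
--             if i_o[0] == "0":
--                 res += z
--             elif i_o[0] == "1":
--                 res += "?"
--             i_o = i_o[1:]
--
--     return res
-- ===== SOURCE B (Python) =====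
-- def question_conv(in_string: str, seed: int) -> str:
--     if seed < 1:
--         return in_string
--     tot_raw = sum(1 for c in in_string if c not in "*?")
--     L = max(tot_raw, seed.bit_length())
--     out = []
--     k = 0
--     for c in in_string:
--         if c in "*?":
--             out.append(c)
--         else:
--             out.append("?" if (seed >> (L - 1 - k)) & 1 else c)
--             k += 1
--     return "".join(out)
-- ===== Notes on version B (the rewrite author's own statement) =====
-- stated objective: faster
-- what changed: B never builds the zfilled binary string: it keeps the raw integer seed and reads bit (L-1-k) by shift/mask (L = max(raw-char count, seed.bit_length())) while walking the string with a counter of real characters, removing A's repeatedly re-sliced bit string (i_o = i_o[1:]) and quadratic string +=.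
import Mathlib
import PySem

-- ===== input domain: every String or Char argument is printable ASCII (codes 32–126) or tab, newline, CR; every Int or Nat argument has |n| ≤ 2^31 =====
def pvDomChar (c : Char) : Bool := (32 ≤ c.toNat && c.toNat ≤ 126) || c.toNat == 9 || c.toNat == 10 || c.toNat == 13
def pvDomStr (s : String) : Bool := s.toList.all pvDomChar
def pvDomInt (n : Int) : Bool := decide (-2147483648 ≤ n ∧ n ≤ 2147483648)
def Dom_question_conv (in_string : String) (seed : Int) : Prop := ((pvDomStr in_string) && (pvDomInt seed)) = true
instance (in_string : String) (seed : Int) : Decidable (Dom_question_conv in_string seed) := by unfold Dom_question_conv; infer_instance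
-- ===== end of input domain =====

-- B drops A's maintained binary string + slicing and reads bits off the raw integer with shift/mask arithmetic (objective: faster; avoids A's quadratic repeated slicing of the bit string).

-- ===== PORT A =====
-- bin(n)[2:] for n ≥ 1 (empty for 0): most-significant bit first
def pvNatBin (n : Nat) : List Char :=
  if h : n = 0 then []
  else pvNatBin (n / 2) ++ [if n % 2 = 1 then '1' else '0']
decreasing_by exact Nat.div_lt_self (Nat.pos_of_ne_zero h) one_lt_two

-- str.zfill on a digit string (no sign character can occur here)
def pvZfill (xs : List Char) (w : Nat) : List Char := List.replicate (w - xs.length) '0' ++ xs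

-- A's second loop; the `[]` io case is unreachable when called from question_conv (Python never indexes an exhausted i_o there)
def pvLoopA : List Char → List Char → List Char → List Char
  | [], _, res => res
  | z :: cs, io, res =>
    if z = '*' ∨ z = '?' then pvLoopA cs io (res ++ [z])
    else match io with
      | [] => pvLoopA cs [] res
      | c :: rest =>
          pvLoopA cs rest (if c = '0' then res ++ [z] else if c = '1' then res ++ ['?'] else res)

def question_conv (in_string : String) (seed : Int) : String :=
  if seed < 1 then in_string
  else
    let tot_raw := in_string.toList.foldl (fun acc t => if t = '*' ∨ t = '?' then acc else acc + 1) 0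
    let i_o := pvZfill (pvNatBin seed.toNat) tot_raw
    String.mk (pvLoopA in_string.toList i_o [])

-- ===== PORT B =====
-- int.bit_length for n ≥ 0
def pvBitLen (n : Nat) : Nat := if n = 0 then 0 else Nat.log2 n + 1

def pvLoopB (n L : Nat) : List Char → Nat → List Char → List Char
  | [], _, out => out
  | c :: cs, k, out =>
    if c = '*' ∨ c = '?' then pvLoopB n L cs k (out ++ [c])
    else pvLoopB n L cs (k + 1) (out ++ [if (n >>> (L - 1 - k)) % 2 = 1 then '?' else c])

def question_conv_alt (in_string : String) (seed : Int) : String :=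
  if seed < 1 then in_string
  else
    let n := seed.toNat
    let tot_raw := in_string.toList.countP (fun c => !(c == '*' || c == '?'))
    let L := max tot_raw (pvBitLen n)
    String.mk (pvLoopB n L in_string.toList 0 [])

-- ===== PRECONDITION & SPEC =====
def Spec_question_conv (in_string : String) (seed : Int) (out : String) : Prop := out = question_conv_alt in_string seed
instance (in_string : String) (seed : Int) (out : String) : Decidable (Spec_question_conv in_string seed out) := by unfold Spec_question_conv; infer_instance

-- ===== CLAIM (what is proved, stated in full; the proofs are below) =====
def Claim_equal_question_conv : Prop := ∀ (in_string : String) (seed : Int), Dom_question_conv in_string seed → Spec_question_conv in_string seed (question_conv in_string seed)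

-- ===== LEMMAS AND PROOFS =====

def pvBitChar (n i : Nat) : Char := if (n >>> i) % 2 = 1 then '1' else '0'

def pvBits (n m : Nat) : List Char := (List.range m).map (fun j => pvBitChar n (m - 1 - j))

theorem pvBits_succ_cons (n m : Nat) : pvBits n (m + 1) = pvBitChar n m :: pvBits n m := by
  unfold pvBits
  rw [List.range_succ_eq_map, List.map_cons, List.map_map]
  refine congrArg₂ _ (by simp) (List.map_congr_left ?_)
  intro j _; simp only [Function.comp]; congr 1; omega

theorem pvBits_succ_snoc (n m : Nat) : pvBits n (m + 1) = pvBits (n / 2) m ++ [pvBitChar n 0] := by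
  unfold pvBits
  rw [List.range_succ, List.map_append]
  refine congrArg₂ _ (List.map_congr_left ?_) (by simp)
  intro j hj
  rw [List.mem_range] at hj
  have h1 : m + 1 - 1 - j = (m - 1 - j) + 1 := by omega
  unfold pvBitChar
  rw [h1, Nat.shiftRight_succ_inside]

theorem pvLog2_step (n : Nat) (h : 2 ≤ n) : Nat.log2 n = Nat.log2 (n / 2) + 1 := by
  rw [Nat.log2_eq_log_two, Nat.log2_eq_log_two, Nat.log_div_base 2 n]
  have := Nat.log_pos (b := 2) (by norm_num) h
  omega

theorem pvBitLen_two_le (n : Nat) (h : 2 ≤ n) : pvBitLen n = pvBitLen (n / 2) + 1 := by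
  unfold pvBitLen
  have h2 : ¬ n = 0 := by omega
  have h3 : ¬ n / 2 = 0 := by
    intro hc; have := Nat.lt_of_div_eq_zero (by norm_num) hc; omega
  simp only [h2, h3, if_false]
  rw [pvLog2_step n h]

theorem pvNatBin_eq_bits (n : Nat) (h : 1 ≤ n) : pvNatBin n = pvBits n (pvBitLen n) := by
  induction n using Nat.strong_induction_on with
  | _ n ih =>
    by_cases h2 : n < 2
    · have h1 : n = 1 := by omega
      subst h1
      rw [pvNatBin, pvNatBin]
      have hl : Nat.log2 1 = 0 := by rw [Nat.log2_eq_log_two]; simp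
      simp [pvBitLen, pvBits, pvBitChar, hl]
    · have h2' : 2 ≤ n := by omega
      rw [pvNatBin]
      have hnz : ¬ n = 0 := by omega
      simp only [hnz, dif_neg, not_false_iff]
      have hd : 1 ≤ n / 2 := (Nat.one_le_div_iff (by norm_num)).2 h2'
      rw [ih (n / 2) (Nat.div_lt_self (by omega) one_lt_two) hd]
      rw [pvBitLen_two_le n h2', pvBits_succ_snoc]
      congr 1

theorem pvBits_length (n m : Nat) : (pvBits n m).length = m := by simp [pvBits]

theorem pvBitChar_high (n i : Nat) (h : pvBitLen n ≤ i) : pvBitChar n i = '0' := by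
  unfold pvBitChar
  have hz : n >>> i = 0 := by
    rw [Nat.shiftRight_eq_div_pow, Nat.div_eq_of_lt]
    rcases Nat.eq_zero_or_pos n with h0 | h0
    · subst h0; positivity
    · have h1 : n < 2 ^ (Nat.log2 n + 1) := Nat.lt_log2_self
      have h2 : pvBitLen n = Nat.log2 n + 1 := by
        unfold pvBitLen
        have : ¬ n = 0 := by omega
        simp [this]
      calc n < 2 ^ (Nat.log2 n + 1) := h1
        _ ≤ 2 ^ i := Nat.pow_le_pow_right (by norm_num) (by omega)
  simp [hz]

theorem pvZfill_bits (n t : Nat) (h : 1 ≤ n) :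
    pvZfill (pvNatBin n) t = pvBits n (max t (pvBitLen n)) := by
  rw [pvZfill, pvNatBin_eq_bits n h, pvBits_length]
  by_cases hle : t ≤ pvBitLen n
  · rw [Nat.max_eq_right hle]
    have h0 : t - pvBitLen n = 0 := by omega
    rw [h0, List.replicate_zero, List.nil_append]
  · have hlt : pvBitLen n < t := by omega
    rw [Nat.max_eq_left (le_of_lt hlt)]
    obtain ⟨a, ha⟩ : ∃ a, t = a + pvBitLen n := ⟨t - pvBitLen n, by omega⟩
    subst ha
    rw [Nat.add_sub_cancel]
    unfold pvBits
    rw [List.range_add, List.map_append]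
    congr 1
    · symm
      rw [List.eq_replicate_iff]
      refine ⟨by simp, ?_⟩
      intro c hc
      rw [List.mem_map] at hc
      obtain ⟨j, hj, hcj⟩ := hc
      rw [List.mem_range] at hj
      rw [← hcj]
      exact pvBitChar_high n _ (by omega)
    · rw [List.map_map]
      apply List.map_congr_left
      intro j hj
      rw [List.mem_range] at hj
      simp only [Function.comp]
      congr 1
      omega

theorem pvCount_foldl (cs : List Char) (acc : Nat) :
    cs.foldl (fun acc t => if t = '*' ∨ t = '?' then acc else acc + 1) acc
      = acc + cs.countP (fun c => !(c == '*' || c == '?')) := by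
  induction cs generalizing acc with
  | nil => simp
  | cons c cs ih =>
    rw [List.foldl_cons, List.countP_cons, ih]
    by_cases h : c = '*' ∨ c = '?'
    · have hb : (!(c == '*' || c == '?')) = false := by
        rcases h with h | h <;> simp [h]
      simp [h, hb]
    · push_neg at h
      have hb : (!(c == '*' || c == '?')) = true := by simp [h.1, h.2]
      simp [h.1, h.2, hb]
      omega

theorem pvLoop_eq (n L : Nat) (cs : List Char) :
    ∀ (k : Nat) (res : List Char),
      cs.countP (fun c => !(c == '*' || c == '?')) + k ≤ L →
      pvLoopA cs (pvBits n (L - k)) res = pvLoopB n L cs k res := by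
  induction cs with
  | nil => intro k res _; rfl
  | cons z cs ih =>
    intro k res hle
    rw [List.countP_cons] at hle
    by_cases h : z = '*' ∨ z = '?'
    · have hb : (!(z == '*' || z == '?')) = false := by
        rcases h with h | h <;> simp [h]
      rw [hb, if_neg Bool.false_ne_true] at hle
      simp only [pvLoopA, pvLoopB, h, if_true]
      exact ih k (res ++ [z]) (by omega)
    · push_neg at h
      have hb : (!(z == '*' || z == '?')) = true := by simp [h.1, h.2]
      rw [hb, if_pos rfl] at hle
      have hk : k < L := by omega
      have hLk : L - k = (L - k - 1) + 1 := by omega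
      have hcond : ¬ (z = '*' ∨ z = '?') := by tauto
      rw [hLk, pvBits_succ_cons]
      simp only [pvLoopA, pvLoopB, hcond, if_false]
      have hidx : L - 1 - k = L - k - 1 := by omega
      have hstep : (if pvBitChar n (L - k - 1) = '0' then res ++ [z]
          else if pvBitChar n (L - k - 1) = '1' then res ++ ['?'] else res)
          = res ++ [if (n >>> (L - 1 - k)) % 2 = 1 then '?' else z] := by
        rw [hidx]
        unfold pvBitChar
        by_cases hbit : (n >>> (L - k - 1)) % 2 = 1 <;> simp [hbit]
      rw [hstep]
      have harg : L - k - 1 = L - (k + 1) := by omega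
      rw [harg]
      exact ih (k + 1) (res ++ [if (n >>> (L - 1 - k)) % 2 = 1 then '?' else z]) (by omega)

-- ===== VERDICT (by name: the statement is the Claim_ definition above) =====
theorem question_conv_spec : Claim_equal_question_conv := by
  unfold Claim_equal_question_conv
  intro s seed _
  unfold Spec_question_conv question_conv question_conv_alt
  by_cases hs : seed < 1
  · simp [hs]
  · simp only [hs, if_false]
    have hn : 1 ≤ seed.toNat := by omega
    set cs := s.toList
    set cnt := cs.countP (fun c => !(c == '*' || c == '?')) with hcnt
    have htot : cs.foldl (fun acc t => if t = '*' ∨ t = '?' then acc else acc + 1) 0 = cnt := by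
      rw [pvCount_foldl]; omega
    rw [htot, pvZfill_bits seed.toNat cnt hn]
    set L := max cnt (pvBitLen seed.toNat) with hL
    have h0 : pvBits seed.toNat L = pvBits seed.toNat (L - 0) := by norm_num
    rw [h0, pvLoop_eq seed.toNat L cs 0 [] (by omega)]
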